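-- pv_equiv track=rewrite | github.com/crapy0/git-project | pythonAssi2/example2/chkDup.py | chkDup
-- ===== SOURCE A (Python) =====
-- def chkDup(lst, limit):
--     b = set()
--     cnt = 0
--     for i in range(len(lst)):
--         for j in range(len(lst)):
--             if lst[i] == lst[j]:
--                 if i != j:
--                     cnt += 1
--                 if cnt >= limit:
--                     b.add(lst[i])
--                     break
--         cnt = 0
--     return b
-- ===== SOURCE B (Python) =====
-- def chkDup(lst, limit):
--     counts = {}
--     for x in lst:
--         counts[x] = counts.get(x, 0) + 1
--     return {x for x, c in counts.items() if c - 1 >= limit}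
-- ===== Notes on version B (the rewrite author's own statement) =====
-- stated objective: faster
-- what changed: Replaced A's quadratic nested re-scan (for each index, rescan the whole list counting equal elements) by a single dict-counting pass followed by a filter over the counter's items.
import Mathlib
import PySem

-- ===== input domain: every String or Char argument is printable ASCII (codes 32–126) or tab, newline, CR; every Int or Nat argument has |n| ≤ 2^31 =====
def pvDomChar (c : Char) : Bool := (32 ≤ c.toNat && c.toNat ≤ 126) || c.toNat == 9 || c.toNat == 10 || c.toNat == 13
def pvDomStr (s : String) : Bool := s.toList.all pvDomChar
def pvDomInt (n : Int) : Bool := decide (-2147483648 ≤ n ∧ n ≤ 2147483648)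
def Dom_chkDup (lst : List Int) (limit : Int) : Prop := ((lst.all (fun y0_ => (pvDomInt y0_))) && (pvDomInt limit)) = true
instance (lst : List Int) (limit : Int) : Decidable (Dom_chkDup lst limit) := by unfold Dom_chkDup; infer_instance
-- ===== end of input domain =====

-- B replaces A's nested re-scan of the list by one dict-counting pass plus a filter over the counter's
-- items (objective: faster). Both return a Python set, modelled as the list of distinct members in
-- first-insertion order (identical for both programs: first-occurrence order of the qualifying values).

-- ===== PORT A =====
-- A's inner 'for j' loop: cnt counts equal elements at other indices; the 'break' right after
-- b.add(lst[i]) is modelled by returning from the recursion at that point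
def chkDupInner (lst : List Int) (limit i : Int) (b : PySem.Set Int) : List Int → Int → PySem.Set Int
  | [], _ => b
  | j :: js, cnt =>
    if PySem.List.pyGetD lst i 0 == PySem.List.pyGetD lst j 0 then
      let cnt' := if i != j then cnt + 1 else cnt
      if limit ≤ cnt' then PySem.Set.add b (PySem.List.pyGetD lst i 0)
      else chkDupInner lst limit i b js cnt'
    else chkDupInner lst limit i b js cnt


def chkDup (lst : List Int) (limit : Int) : List Int :=
  (PySem.List.pyRange 0 lst.length 1).foldl
    (fun b i => chkDupInner lst limit i b (PySem.List.pyRange 0 lst.length 1) 0) []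

-- ===== PORT B =====
def chkDup_alt (lst : List Int) (limit : Int) : List Int :=
  let counts := lst.foldl (fun d x => d.insert x (d.getD x 0 + 1)) PySem.Dict.empty
  PySem.Set.ofList ((counts.items.filter (fun p => limit ≤ p.2 - 1)).map Prod.fst)

-- ===== PRECONDITION & SPEC =====
def Spec_chkDup (lst : List Int) (limit : Int) (out : List Int) : Prop := out = chkDup_alt lst limit
instance (lst : List Int) (limit : Int) (out : List Int) : Decidable (Spec_chkDup lst limit out) := by unfold Spec_chkDup; infer_instance

-- ===== CLAIM (what is proved, stated in full; the proofs are below) =====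
def Claim_equal_chkDup : Prop := ∀ (lst : List Int) (limit : Int), Dom_chkDup lst limit → Spec_chkDup lst limit (chkDup lst limit)

-- ===== LEMMAS AND PROOFS =====

-- A's inner loop adds the value iff some scanned position matches it and cnt plus the number of
-- matches at other positions reaches limit
theorem chkDupInner_eq (lst : List Int) (limit i v : Int)
    (hv : PySem.List.pyGetD lst i 0 = v) :
    ∀ (js : List Int) (cnt : Int) (b : PySem.Set Int),
    chkDupInner lst limit i b js cnt =
      if (js.any fun j => PySem.List.pyGetD lst j 0 == v) = true ∧
         limit ≤ cnt + (js.countP (fun j => PySem.List.pyGetD lst j 0 == v && j != i) : Int)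
      then PySem.Set.add b v else b := by
  intro js
  induction js with
  | nil => intro cnt b; simp [chkDupInner]
  | cons j js ih =>
    intro cnt b
    rw [chkDupInner, hv]
    by_cases hm : PySem.List.pyGetD lst j 0 = v
    · rw [hm, if_pos (by simp : ((v == v) = true))]
      dsimp only
      by_cases hij : i = j
      · subst hij
        rw [if_neg (by simp : ¬ ((i != i) = true))]
        by_cases hl : limit ≤ cnt
        · rw [if_pos hl, if_pos]
          refine ⟨by simp [hm], ?_⟩
          simp only [List.countP_cons]
          omega
        · rw [if_neg hl, ih]
          by_cases ha : (js.any fun j' => PySem.List.pyGetD lst j' 0 == v) = true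
          · refine if_congr ?_ rfl rfl
            simp only [List.any_cons, List.countP_cons, hm, beq_self_eq_true, bne_self_eq_false,
              Bool.and_false, ha, Bool.or_true, true_and, Bool.false_eq_true, if_false]
            omega
          · have h0 : js.countP (fun j' => PySem.List.pyGetD lst j' 0 == v && j' != i) = 0 := by
              rw [List.countP_eq_zero]
              intro a hain
              have := List.any_eq_false.mp (Bool.eq_false_iff.mpr ha) a hain
              simp_all
            rw [if_neg (fun h => ha h.1), if_neg]
            intro ⟨_, h2⟩
            simp only [List.countP_cons, h0, hm, beq_self_eq_true, bne_self_eq_false,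
              Bool.and_false, Bool.false_eq_true, if_false] at h2
            omega
      · have hbne : (j != i) = true := by simp [bne]; exact fun h => hij h.symm
        rw [if_pos (by simp [bne]; exact hij : ((i != j) = true))]
        by_cases hl : limit ≤ cnt + 1
        · rw [if_pos hl, if_pos]
          refine ⟨by simp [hm], ?_⟩
          simp only [List.countP_cons, hm, beq_self_eq_true, hbne, Bool.and_true, if_true]
          push_cast
          omega
        · rw [if_neg hl, ih]
          by_cases ha : (js.any fun j' => PySem.List.pyGetD lst j' 0 == v) = true
          · refine if_congr ?_ rfl rfl
            simp only [List.any_cons, List.countP_cons, hm, beq_self_eq_true, hbne,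
              Bool.and_true, ha, Bool.or_true, true_and, if_true]
            push_cast
            omega
          · have h0 : js.countP (fun j' => PySem.List.pyGetD lst j' 0 == v && j' != i) = 0 := by
              rw [List.countP_eq_zero]
              intro a hain
              have := List.any_eq_false.mp (Bool.eq_false_iff.mpr ha) a hain
              simp_all
            rw [if_neg (fun h => ha h.1), if_neg]
            intro ⟨_, h2⟩
            simp only [List.countP_cons, h0, hm, beq_self_eq_true, hbne, Bool.and_true,
              if_true] at h2
            omega
    · rw [if_neg (by simp; exact fun h => hm h.symm), ih]
      refine if_congr ?_ rfl rfl
      simp only [List.any_cons, List.countP_cons]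
      constructor
      · intro ⟨h1, h2⟩
        refine ⟨by simp [h1], ?_⟩
        simp only [show (PySem.List.pyGetD lst j 0 == v) = false from by simp [hm], Bool.false_and, Bool.false_eq_true, if_false]
        omega
      · intro ⟨h1, h2⟩
        have : (PySem.List.pyGetD lst j 0 == v) = false := by simp [hm]
        simp only [this, Bool.false_or] at h1
        simp only [this, Bool.false_and, Bool.false_eq_true, if_false] at h2
        exact ⟨h1, by omega⟩


theorem countP_range_getD (lst : List Int) (v : Int) :
    (List.range lst.length).countP (fun j => lst.getD j 0 == v) = lst.count v := by
  induction lst with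
  | nil => simp
  | cons x xs ih =>
    simp only [List.length_cons, List.range_succ_eq_map, List.countP_cons, List.countP_map,
      List.getD_cons_zero, List.count_cons]
    have : (List.countP ((fun j => (x :: xs).getD j 0 == v) ∘ Nat.succ) (List.range xs.length))
        = List.countP (fun j => xs.getD j 0 == v) (List.range xs.length) := by
      apply List.countP_congr
      intro a _
      simp [Function.comp]
    rw [this, ih]

theorem countP_ne_of_mem (l : List Nat) (p : Nat → Bool) (k : Nat)
    (hnd : l.Nodup) (hk : k ∈ l) (hp : p k = true) :
    l.countP (fun a => p a && !(a == k)) + 1 = l.countP p := by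
  induction l with
  | nil => simp at hk
  | cons a l ih =>
    by_cases hak : a = k
    · subst hak
      have hnotin : a ∉ l := (List.nodup_cons.mp hnd).1
      have hcongr : l.countP (fun x => p x && !(x == a)) = l.countP p := by
        apply List.countP_congr
        intro x hx
        have hxa : (x == a) = false := by
          simp only [beq_eq_false_iff_ne, ne_eq]
          exact fun h => hnotin (h ▸ hx)
        simp [hxa]
      simp only [List.countP_cons, hp, hcongr, beq_self_eq_true, Bool.not_true, Bool.and_false]
      simp
    · have hkl : k ∈ l := by
        rcases List.mem_cons.mp hk with h | h
        · exact absurd h.symm hak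
        · exact h
      have := ih (List.nodup_cons.mp hnd).2 hkl
      have hba : (a == k) = false := by simp [hak]
      simp only [List.countP_cons, hba, Bool.not_false, Bool.and_true]
      omega

theorem filter_add (p : Int → Bool) (s : PySem.Set Int) (x : Int) :
    (PySem.Set.add s x).filter p = if p x then PySem.Set.add (s.filter p) x else s.filter p := by
  by_cases hp : p x = true
  · rw [if_pos hp]
    by_cases hc : x ∈ s
    · have h1 : PySem.Set.add s x = s := by simp [PySem.Set.add, PySem.Set.contains, hc]
      have h2 : x ∈ s.filter p := List.mem_filter.mpr ⟨hc, hp⟩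
      rw [h1]
      simp [PySem.Set.add, PySem.Set.contains, h2]
    · have h2 : x ∉ s.filter p := fun h => hc (List.mem_filter.mp h).1
      simp [PySem.Set.add, PySem.Set.contains, hc, h2, List.filter_append, hp]
  · rw [if_neg hp]
    by_cases hc : x ∈ s
    · simp [PySem.Set.add, PySem.Set.contains, hc]
    · simp [PySem.Set.add, PySem.Set.contains, hc, List.filter_append,
        Bool.eq_false_iff.mpr hp]

theorem foldl_add_filter (p : Int → Bool) :
    ∀ (l : List Int) (acc : PySem.Set Int),
    (l.foldl PySem.Set.add acc).filter p = (l.filter p).foldl PySem.Set.add (acc.filter p) := by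
  intro l
  induction l with
  | nil => intro acc; simp
  | cons x l ih =>
    intro acc
    simp only [List.foldl_cons, List.filter_cons]
    by_cases hp : p x = true
    · rw [if_pos hp, ih, List.foldl_cons, filter_add, if_pos hp]
    · rw [if_neg hp, ih, filter_add, if_neg hp]

theorem filter_ofList (p : Int → Bool) (l : List Int) :
    (PySem.Set.ofList l).filter p = PySem.Set.ofList (l.filter p) := by
  rw [PySem.Set.ofList_eq_foldl, PySem.Set.ofList_eq_foldl, foldl_add_filter]
  simp

theorem foldl_add_nodup : ∀ (l acc : List Int), (acc ++ l).Nodup →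
    l.foldl PySem.Set.add acc = acc ++ l := by
  intro l
  induction l with
  | nil => intro acc _; simp
  | cons x l ih =>
    intro acc h
    have hx : x ∉ acc := by
      intro hmem
      have := List.disjoint_of_nodup_append h
      exact this hmem List.mem_cons_self
    have hadd : PySem.Set.add acc x = acc ++ [x] := by
      simp [PySem.Set.add, PySem.Set.contains, hx]
    rw [List.foldl_cons, hadd, ih]
    · simp
    · simpa using h


theorem ofList_of_nodup (l : List Int) (h : l.Nodup) : PySem.Set.ofList l = l := by
  rw [PySem.Set.ofList_eq_foldl, foldl_add_nodup l [] (by simpa using h)]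
  simp

theorem chkDup_eq_ofList (lst : List Int) (limit : Int) :
    chkDup lst limit
      = PySem.Set.ofList (lst.filter (fun x => decide (limit ≤ (lst.count x : Int) - 1))) := by
  unfold chkDup
  rw [PySem.List.foldl_congr_mem _ _
    (fun b i => if limit ≤ (lst.count (PySem.List.pyGetD lst i 0) : Int) - 1
      then PySem.Set.add b (PySem.List.pyGetD lst i 0) else b) _ ?_]
  · rw [show (fun (b : PySem.Set Int) (i : Int) =>
        if limit ≤ (lst.count (PySem.List.pyGetD lst i 0) : Int) - 1
        then PySem.Set.add b (PySem.List.pyGetD lst i 0) else b)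
      = (fun (b : PySem.Set Int) (i : Int) =>
        (fun (b : PySem.Set Int) (x : Int) =>
          if limit ≤ (lst.count x : Int) - 1 then PySem.Set.add b x else b)
        b (PySem.List.pyGetD lst i 0)) from rfl]
    have hfm := List.foldl_map (f := fun i => PySem.List.pyGetD lst i 0)
      (g := fun (b : PySem.Set Int) (x : Int) =>
        if limit ≤ ((lst.count x : Nat) : Int) - 1 then PySem.Set.add b x else b)
      (l := PySem.List.pyRange 0 (lst.length : Int) 1) (init := ([] : PySem.Set Int))
    rw [← hfm]
    have hmap := PySem.List.map_pyGetD_pyRange_zero lst 0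
    simp only [PySem.List.len] at hmap
    rw [hmap, PySem.List.foldl_ite_eq_foldl_filter, ← PySem.Set.ofList_eq_foldl]
  · intro b i hi
    obtain ⟨h0, hn⟩ := PySem.List.mem_pyRange_one.mp hi
    rw [chkDupInner_eq lst limit i (PySem.List.pyGetD lst i 0) rfl]
    have hk : i = ((i.toNat : Nat) : Int) := by omega
    have hklt : i.toNat < lst.length := by omega
    have hgv : PySem.List.pyGetD lst i 0 = lst.getD i.toNat 0 := by
      rw [hk, PySem.List.pyGetD_natCast]
      have h2 : (((i.toNat : Nat) : Int)).toNat = i.toNat := by omega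
      rw [h2]
    have hany : ((PySem.List.pyRange 0 (lst.length : Int) 1).any
        fun j => PySem.List.pyGetD lst j 0 == PySem.List.pyGetD lst i 0) = true :=
      List.any_eq_true.mpr ⟨i, hi, by simp⟩
    have hcount : ((PySem.List.pyRange 0 (lst.length : Int) 1).countP
        (fun j => PySem.List.pyGetD lst j 0 == PySem.List.pyGetD lst i 0 && j != i)) + 1
        = lst.count (PySem.List.pyGetD lst i 0) := by
      rw [PySem.List.pyRange_zero_natCast, List.countP_map]
      rw [List.countP_congr ?_ (q := fun m => (lst.getD m 0 == PySem.List.pyGetD lst i 0)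
            && !(m == i.toNat))]
      · rw [countP_ne_of_mem _ _ _ List.nodup_range (List.mem_range.mpr hklt)
          (by rw [hgv]; simp), countP_range_getD]
      · intro m _
        have hb : (((m : Nat) : Int) != i) = !(m == i.toNat) := by
          by_cases hmi : m = i.toNat
          · subst hmi
            rw [← hk]
            simp
          · have hne : ((m : Nat) : Int) ≠ i := by omega
            have h1 : (((m : Nat) : Int) != i) = true := bne_iff_ne.mpr hne
            have h2 : (m == i.toNat) = false := by simpa using hmi
            rw [h1, h2]
            rfl
        have hgoal : (PySem.List.pyGetD lst ((m : Nat) : Int) 0 == PySem.List.pyGetD lst i 0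
              && (((m : Nat) : Int) != i))
            = (lst.getD m 0 == PySem.List.pyGetD lst i 0 && !(m == i.toNat)) := by
          rw [PySem.List.pyGetD_natCast, hb]
        show ((fun j => PySem.List.pyGetD lst j 0 == PySem.List.pyGetD lst i 0 && j != i) ∘ fun k => ((k : Nat) : Int)) m = true ↔ (lst.getD m 0 == PySem.List.pyGetD lst i 0 && !(m == i.toNat)) = true
        rw [Function.comp_apply, hgoal]
    refine if_congr ?_ rfl rfl
    rw [hany]
    simp only [true_and]
    omega

theorem chkDup_alt_eq_ofList (lst : List Int) (limit : Int) :
    chkDup_alt lst limit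
      = PySem.Set.ofList (lst.filter (fun x => decide (limit ≤ (lst.count x : Int) - 1))) := by
  unfold chkDup_alt
  rw [PySem.Dict.foldl_insert_getD_add_one_eq_counter]
  dsimp only
  rw [PySem.Dict.items_counter]
  rw [List.filter_map, List.map_map]
  rw [show (Prod.fst ∘ (fun (k : Int) => ((k, ((List.count k lst : Nat) : Int)) : Int × Int)))
      = id from rfl]
  rw [List.map_id]
  rw [show ((fun (p : Int × Int) => decide (limit ≤ p.2 - 1)) ∘
      (fun (k : Int) => ((k, ((List.count k lst : Nat) : Int)) : Int × Int)))
      = (fun x => decide (limit ≤ (lst.count x : Int) - 1)) from rfl]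
  rw [filter_ofList, ofList_of_nodup _ (PySem.Set.nodup_ofList _)]

-- both programs compute the same set: A's output characterized
theorem chkDup_main (lst : List Int) (limit : Int) : chkDup lst limit = chkDup_alt lst limit := by
  rw [chkDup_eq_ofList, chkDup_alt_eq_ofList]

-- ===== VERDICT (by name: the statement is the Claim_ definition above) =====
theorem chkDup_spec : Claim_equal_chkDup := by
  intro lst limit _
  unfold Spec_chkDup
  exact chkDup_main lst limit
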